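-- pv_equiv track=rewrite | github.com/Adam0s007/DSA | dynamic programming/zadania Szymona/zad5k.py | garek
-- ===== SOURCE A (Python) =====
-- def garek ( A ):
--     lookup = [[0 for x in range(len(A))] for y in range(len(A))]
--     def findMaxCoins(coin, i, j, lookup):
--         if i == j:
--             return coin[i]
--         if i + 1 == j:
--             return max(coin[i], coin[j])
--         if lookup[i][j] == 0:
--             start = coin[i] + min(findMaxCoins(coin, i + 2, j, lookup),
--                                 findMaxCoins(coin, i + 1, j - 1, lookup))
--             end = coin[j] + min(findMaxCoins(coin, i + 1, j - 1, lookup),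
--                                 findMaxCoins(coin, i, j - 2, lookup))
--             lookup[i][j] = max(start, end)
--         return lookup[i][j]
--     return findMaxCoins(A, 0,len(A)-1,lookup)
-- ===== SOURCE B (Python) =====
-- def garek(A):
--     n = len(A)
--     dp = [[0] * n for _ in range(n)]
--     for i in range(n):
--         dp[i][i] = A[i]
--     for i in range(n - 1):
--         dp[i][i + 1] = max(A[i], A[i + 1])
--     for gap in range(2, n):
--         for i in range(n - gap):
--             j = i + gap
--             start = A[i] + min(dp[i + 2][j], dp[i + 1][j - 1])
--             end = A[j] + min(dp[i + 1][j - 1], dp[i][j - 2])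
--             dp[i][j] = max(start, end)
--     return dp[0][n - 1]
-- ===== Notes on version B (the rewrite author's own statement) =====
-- stated objective: alternative
-- what changed: Replaced the memoized top-down recursion over (i,j) with an iterative bottom-up 2D table filled by increasing interval length.
import Mathlib
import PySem

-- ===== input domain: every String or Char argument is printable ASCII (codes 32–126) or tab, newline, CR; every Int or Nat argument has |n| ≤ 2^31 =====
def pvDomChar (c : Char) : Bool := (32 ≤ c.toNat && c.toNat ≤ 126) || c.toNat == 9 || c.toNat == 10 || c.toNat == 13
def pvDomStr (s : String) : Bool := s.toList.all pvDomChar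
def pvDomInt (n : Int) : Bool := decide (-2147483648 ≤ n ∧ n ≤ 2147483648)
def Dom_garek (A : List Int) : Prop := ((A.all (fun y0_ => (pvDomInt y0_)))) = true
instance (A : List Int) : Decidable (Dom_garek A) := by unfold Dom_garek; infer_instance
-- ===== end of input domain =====

-- B replaces A's memoized top-down recursion by an iterative bottom-up table filled by
-- increasing interval length (alternative decomposition; same quadratic cost).

-- ===== PORT A =====
-- A's memo table `lookup` is a value-transparent cache (a cell is either 0, in which case the
-- value is recomputed, or holds exactly the value the recursion would return), so the port is
-- A's recursion itself; j is encoded as i + gap so the recursion is structural on gap (every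
-- recursive call of A drops j - i by exactly 2); branches are in A's order.
def findMaxCoinsA (coin : List Int) : Nat → Nat → Int
  | i, 0 => coin.getD i 0                                   -- i == j
  | i, 1 => max (coin.getD i 0) (coin.getD (i + 1) 0)       -- i + 1 == j
  | i, (g + 2) =>
      let start := coin.getD i 0 +
        min (findMaxCoinsA coin (i + 2) g) (findMaxCoinsA coin (i + 1) g)
      let fin := coin.getD (i + g + 2) 0 +
        min (findMaxCoinsA coin (i + 1) g) (findMaxCoinsA coin i g)
      max start fin

def garek (A : List Int) : Int := findMaxCoinsA A 0 (A.length - 1)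

-- ===== PORT B =====
-- B's 2D list dp, with Python's dp[i][j] = v and dp[i][j] reads
def pvSet2 (dp : List (List Int)) (i j : Nat) (v : Int) : List (List Int) :=
  dp.set i ((dp.getD i []).set j v)

def pvGet2 (dp : List (List Int)) (i j : Nat) : Int := (dp.getD i []).getD j 0

-- body of B's inner loop over i at a fixed gap
def pvFillGap (A : List Int) (gap : Nat) (dp : List (List Int)) (i : Nat) : List (List Int) :=
  let j := i + gap
  let start := A.getD i 0 + min (pvGet2 dp (i + 2) j) (pvGet2 dp (i + 1) (j - 1))
  let fin := A.getD j 0 + min (pvGet2 dp (i + 1) (j - 1)) (pvGet2 dp i (j - 2))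
  pvSet2 dp i j (max start fin)

def garek_alt (A : List Int) : Int :=
  let n := A.length
  let dp0 := List.replicate n (List.replicate n (0 : Int))
  let dp1 := (List.range n).foldl (fun dp i => pvSet2 dp i i (A.getD i 0)) dp0
  let dp2 := (List.range (n - 1)).foldl
    (fun dp i => pvSet2 dp i (i + 1) (max (A.getD i 0) (A.getD (i + 1) 0))) dp1
  let dp3 := (List.range' 2 (n - 2)).foldl
    (fun dp gap => (List.range (n - gap)).foldl (pvFillGap A gap) dp) dp2
  pvGet2 dp3 0 (n - 1)

-- ===== PRECONDITION & SPEC =====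
-- Pre_ excludes only the empty list, on which A raises IndexError (indexing row 0 of an empty
-- lookup table); B raises IndexError there too (indexing row 0 of an empty dp table).
def Pre_garek (A : List Int) : Prop := A ≠ []
instance (A : List Int) : Decidable (Pre_garek A) := by unfold Pre_garek; infer_instance
def pvWitness_garek : List Int := [3, 9, 1, 2]

def Spec_garek (A : List Int) (out : Int) : Prop := out = garek_alt A
instance (A : List Int) (out : Int) : Decidable (Spec_garek A out) := by unfold Spec_garek; infer_instance

-- ===== CLAIM (what is proved, stated in full; the proofs are below) =====
def Claim_equal_garek : Prop := ∀ (A : List Int), Dom_garek A → Pre_garek A → Spec_garek A (garek A)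

-- ===== LEMMAS AND PROOFS =====

-- dp is an n × n table
def pvSq (n : Nat) (dp : List (List Int)) : Prop :=
  dp.length = n ∧ ∀ r ∈ dp, r.length = n

lemma pvSq_set (n : Nat) (dp : List (List Int)) (i j : Nat) (v : Int)
    (h : pvSq n dp) (hi : i < n) : pvSq n (pvSet2 dp i j v) := by
  obtain ⟨hlen, hrow⟩ := h
  refine ⟨by simp [pvSet2, hlen], ?_⟩
  intro r hr
  rcases List.mem_or_eq_of_mem_set hr with hr' | hr'
  · exact hrow r hr'
  · subst hr'
    rw [List.length_set]
    have hi' : i < dp.length := hlen ▸ hi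
    have hrw : dp.getD i [] = dp[i] := by
      simp [List.getD_eq_getElem?_getD, List.getElem?_eq_getElem hi']
    rw [hrw]
    exact hrow _ (List.getElem_mem hi')

lemma pvGet2_set_ne (dp : List (List Int)) (i j : Nat) (v : Int) (a b : Nat)
    (h : a ≠ i ∨ b ≠ j) : pvGet2 (pvSet2 dp i j v) a b = pvGet2 dp a b := by
  unfold pvGet2 pvSet2
  rcases h with h | h
  · simp [List.getD_eq_getElem?_getD, List.getElem?_set, (Ne.symm h)]
  · simp only [List.getD_eq_getElem?_getD, List.getElem?_set]
    by_cases hia : i = a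
    · subst hia
      by_cases hl : i < dp.length
      · simp [hl, List.getD_eq_getElem?_getD, List.getElem?_set, (Ne.symm h)]
      · simp [hl, List.getElem?_eq_none (by omega : dp.length ≤ i)]
    · simp [hia]

lemma pvGet2_set (n : Nat) (dp : List (List Int)) (i j : Nat) (v : Int) (a b : Nat)
    (h : pvSq n dp) (hi : i < n) (hj : j < n) :
    pvGet2 (pvSet2 dp i j v) a b = if a = i ∧ b = j then v else pvGet2 dp a b := by
  obtain ⟨hlen, hrow⟩ := h
  by_cases hc : a = i ∧ b = j
  · obtain ⟨rfl, rfl⟩ := hc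
    rw [if_pos ⟨rfl, rfl⟩]
    have hi' : a < dp.length := hlen ▸ hi
    have hrw : dp.getD a [] = dp[a] := by
      simp [List.getD_eq_getElem?_getD, List.getElem?_eq_getElem hi']
    have hrl : (dp.getD a []).length = n := by
      rw [hrw]; exact hrow _ (List.getElem_mem hi')
    have hb2 : b < dp[a].length := by rw [← hrw, hrl]; exact hj
    unfold pvGet2 pvSet2
    simp [List.getD_eq_getElem?_getD, List.getElem?_set, hi', hb2]
  · rw [if_neg hc]
    exact pvGet2_set_ne dp i j v a b (by tauto)

-- the diagonal-filling loop writes A[i] into each cell (i, i) and touches nothing else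
lemma diag_eval (A : List Int) (n : Nat) :
    ∀ (l : List Nat) (dp : List (List Int)), pvSq n dp → (∀ i ∈ l, i < n) →
      pvSq n (l.foldl (fun dp i => pvSet2 dp i i (A.getD i 0)) dp) ∧
      ∀ a b, pvGet2 (l.foldl (fun dp i => pvSet2 dp i i (A.getD i 0)) dp) a b
        = if a = b ∧ a ∈ l then A.getD a 0 else pvGet2 dp a b := by
  intro l
  induction l with
  | nil => intro dp hSq _; exact ⟨hSq, by simp⟩
  | cons c l ih =>
    intro dp hSq hl
    have hc : c < n := hl c (List.mem_cons_self ..)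
    have hSq1 := pvSq_set n dp c c (A.getD c 0) hSq hc
    have hl' : ∀ i ∈ l, i < n := fun i hi => hl i (List.mem_cons_of_mem _ hi)
    obtain ⟨hSq2, hget⟩ := ih _ hSq1 hl'
    refine ⟨by simpa using hSq2, ?_⟩
    intro a b
    rw [List.foldl_cons]
    rw [hget a b, pvGet2_set n dp c c (A.getD c 0) a b hSq hc hc]
    simp only [List.mem_cons]
    by_cases h1 : a = b <;> by_cases h2 : a ∈ l <;> by_cases h3 : a = c <;>
      by_cases h4 : b = c <;> simp_all

-- the superdiagonal loop writes max(A[i], A[i+1]) into each cell (i, i+1)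
lemma diag1_eval (A : List Int) (n : Nat) :
    ∀ (l : List Nat) (dp : List (List Int)), pvSq n dp → (∀ i ∈ l, i + 1 < n) →
      pvSq n (l.foldl (fun dp i => pvSet2 dp i (i + 1) (max (A.getD i 0) (A.getD (i + 1) 0))) dp) ∧
      ∀ a b, pvGet2 (l.foldl (fun dp i => pvSet2 dp i (i + 1) (max (A.getD i 0) (A.getD (i + 1) 0))) dp) a b
        = if b = a + 1 ∧ a ∈ l then max (A.getD a 0) (A.getD b 0) else pvGet2 dp a b := by
  intro l
  induction l with
  | nil => intro dp hSq _; exact ⟨hSq, by simp⟩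
  | cons c l ih =>
    intro dp hSq hl
    have hc : c + 1 < n := hl c (List.mem_cons_self ..)
    have hSq1 := pvSq_set n dp c (c + 1) (max (A.getD c 0) (A.getD (c + 1) 0)) hSq (by omega)
    have hl' : ∀ i ∈ l, i + 1 < n := fun i hi => hl i (List.mem_cons_of_mem _ hi)
    obtain ⟨hSq2, hget⟩ := ih _ hSq1 hl'
    refine ⟨by simpa using hSq2, ?_⟩
    intro a b
    rw [List.foldl_cons]
    rw [hget a b, pvGet2_set n dp c (c + 1) _ a b hSq (by omega) hc]
    simp only [List.mem_cons]
    by_cases h1 : b = a + 1 <;> by_cases h2 : a ∈ l <;> by_cases h3 : a = c <;>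
      simp_all <;> omega

-- B's inner loop at gap g+2: provided the cells of gap g below n already hold the recursion's
-- values, it writes findMaxCoinsA at every processed (i, i+g+2) and touches nothing else
lemma inner_eval (A : List Int) (n g : Nat) :
    ∀ (l : List Nat) (dp : List (List Int)), pvSq n dp →
      (∀ a, a + g < n → pvGet2 dp a (a + g) = findMaxCoinsA A a g) →
      (∀ i ∈ l, i + (g + 2) < n) →
      pvSq n (l.foldl (pvFillGap A (g + 2)) dp) ∧
      ∀ a b, pvGet2 (l.foldl (pvFillGap A (g + 2)) dp) a b
        = if b = a + (g + 2) ∧ a ∈ l then findMaxCoinsA A a (g + 2) else pvGet2 dp a b := by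
  intro l
  induction l with
  | nil => intro dp hSq _ _; exact ⟨hSq, by simp⟩
  | cons c l ih =>
    intro dp hSq hdp hl
    have hc : c + (g + 2) < n := hl c (List.mem_cons_self ..)
    have hstep : pvFillGap A (g + 2) dp c
        = pvSet2 dp c (c + (g + 2)) (findMaxCoinsA A c (g + 2)) := by
      have e1 : c + (g + 2) = (c + 2) + g := by omega
      have e2 : c + (g + 2) - 1 = (c + 1) + g := by omega
      have e3 : c + (g + 2) - 2 = c + g := by omega
      have v1 : pvGet2 dp (c + 2) (c + (g + 2)) = findMaxCoinsA A (c + 2) g := by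
        rw [e1]; exact hdp (c + 2) (by omega)
      have v2 : pvGet2 dp (c + 1) (c + (g + 2) - 1) = findMaxCoinsA A (c + 1) g := by
        rw [e2]; exact hdp (c + 1) (by omega)
      have v3 : pvGet2 dp c (c + (g + 2) - 2) = findMaxCoinsA A c g := by
        rw [e3]; exact hdp c (by omega)
      simp only [pvFillGap, v1, v2, v3, findMaxCoinsA]
      have e4 : c + (g + 2) = c + g + 2 := by omega
      rw [e4]
    have hSq1 : pvSq n (pvFillGap A (g + 2) dp c) := by
      rw [hstep]; exact pvSq_set n dp c _ _ hSq (by omega)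
    have hdp' : ∀ b, b + g < n →
        pvGet2 (pvFillGap A (g + 2) dp c) b (b + g) = findMaxCoinsA A b g := by
      intro b hb
      rw [hstep, pvGet2_set_ne dp c (c + (g + 2)) _ b (b + g) (by
        by_cases hbc : b = c
        · right; omega
        · left; exact hbc)]
      exact hdp b hb
    have hl' : ∀ i ∈ l, i + (g + 2) < n := fun i hi => hl i (List.mem_cons_of_mem _ hi)
    obtain ⟨hSq2, hget⟩ := ih _ hSq1 hdp' hl'
    refine ⟨by simpa using hSq2, ?_⟩
    intro a b
    rw [List.foldl_cons, hget a b, hstep,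
      pvGet2_set n dp c (c + (g + 2)) _ a b hSq (by omega) hc]
    simp only [List.mem_cons]
    by_cases h1 : b = a + (g + 2) <;> by_cases h2 : a ∈ l <;> by_cases h3 : a = c <;>
      simp_all <;> omega

-- invariant: every cell of gap below g agrees with the recursion
def pvInv (A : List Int) (n : Nat) (dp : List (List Int)) (g : Nat) : Prop :=
  ∀ g' a, g' < g → a + g' < n → pvGet2 dp a (a + g') = findMaxCoinsA A a g'

-- B's outer loop over gaps g0, g0+1, …, g0+k-1 extends the invariant from g0 to g0+k
lemma outer_eval (A : List Int) (n : Nat) :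
    ∀ (k g0 : Nat) (dp : List (List Int)), 2 ≤ g0 → pvSq n dp → pvInv A n dp g0 →
      pvInv A n ((List.range' g0 k).foldl
        (fun dp gap => (List.range (n - gap)).foldl (pvFillGap A gap) dp) dp) (g0 + k) := by
  intro k
  induction k with
  | zero => intro g0 dp _ _ h; simpa using h
  | succ k ih =>
    intro g0 dp hg0 hSq hInv
    rw [List.range'_succ, List.foldl_cons]
    have e2 : g0 - 2 + 2 = g0 := by omega
    have hdp : ∀ a, a + (g0 - 2) < n →
        pvGet2 dp a (a + (g0 - 2)) = findMaxCoinsA A a (g0 - 2) :=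
      fun a ha => hInv (g0 - 2) a (by omega) ha
    have hl : ∀ i ∈ List.range (n - g0), i + (g0 - 2 + 2) < n := by
      intro i hi; rw [e2]; have := List.mem_range.mp hi; omega
    have hinner := inner_eval A n (g0 - 2) (List.range (n - g0)) dp hSq hdp hl
    rw [e2] at hinner
    obtain ⟨hSq1, hget⟩ := hinner
    have hInv1 : pvInv A n ((List.range (n - g0)).foldl (pvFillGap A g0) dp) (g0 + 1) := by
      intro g' a hg' ha
      have hr := hget a (a + g')
      by_cases h : g' = g0
      · subst h
        rw [hr, if_pos ⟨rfl, List.mem_range.mpr (by omega)⟩]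
      · rw [hr, if_neg (by rintro ⟨h1, _⟩; omega)]
        exact hInv g' a (by omega) ha
    have hres := ih (g0 + 1) _ (by omega) hSq1 hInv1
    have e3 : g0 + (k + 1) = g0 + 1 + k := by omega
    rw [e3]
    exact hres

-- ===== VERDICT (by name: the statement is the Claim_ definition above) =====
theorem garek_spec : Claim_equal_garek := by
  intro A _ hPre
  show garek A = garek_alt A
  have hn : 1 ≤ A.length := List.length_pos_iff.mpr hPre
  have hSq0 : pvSq A.length (List.replicate A.length (List.replicate A.length (0 : Int))) := by
    constructor
    · simp
    · intro r hr; rw [List.eq_of_mem_replicate hr]; simp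
  obtain ⟨hSq1, hget1⟩ := diag_eval A A.length (List.range A.length) _ hSq0
    (fun i hi => List.mem_range.mp hi)
  obtain ⟨hSq2, hget2⟩ := diag1_eval A A.length (List.range (A.length - 1)) _ hSq1
    (fun i hi => by have := List.mem_range.mp hi; omega)
  have hInv2 : pvInv A A.length
      ((List.range (A.length - 1)).foldl
        (fun dp i => pvSet2 dp i (i + 1) (max (A.getD i 0) (A.getD (i + 1) 0)))
        ((List.range A.length).foldl (fun dp i => pvSet2 dp i i (A.getD i 0))
          (List.replicate A.length (List.replicate A.length (0 : Int))))) 2 := by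
    intro g' a hg' ha
    rw [hget2]
    interval_cases g'
    · rw [if_neg (by rintro ⟨h1, _⟩; omega)]
      rw [hget1, if_pos ⟨rfl, List.mem_range.mpr (by omega)⟩]
      simp [findMaxCoinsA]
    · rw [if_pos ⟨rfl, List.mem_range.mpr (by omega)⟩]
      simp [findMaxCoinsA]
  have hfinal := outer_eval A A.length (A.length - 2) 2 _ (by omega) hSq2 hInv2
  have hval := hfinal (A.length - 1) 0 (by omega) (by omega)
  have e : 0 + (A.length - 1) = A.length - 1 := by omega
  rw [e] at hval
  exact hval.symm
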